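-- pv_equiv track=rewrite | github.com/hksung/Korean-Lexical-Complexity-Analyzer | klca/core.py | _head_type
-- ===== SOURCE A (Python) =====
-- def _head_type(xpos_seq):
--     """
--     Head type for the eojeol:
--       - 'N' if there is any tag that starts with 'N'
--       - 'V' if there is any tag that starts with 'V'
--     If both exist, choose the earliest occurring one (in morpheme order).
--     If neither, return None.
--     """
--     first_n = None
--     first_v = None
--     for i, x in enumerate(xpos_seq):
--         if first_n is None and x.startswith("N"):
--             first_n = i
--         if first_v is None and x.startswith("V"):
--             first_v = i
--         if first_n is not None and first_v is not None:
--             break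
--
--     if first_n is None and first_v is None:
--         return None
--     if first_n is None:
--         return "V"
--     if first_v is None:
--         return "N"
--     return "N" if first_n < first_v else "V"
-- ===== SOURCE B (Python) =====
-- def _head_type(xpos_seq):
--     # A tag cannot start with both 'N' and 'V', so the earliest of the two
--     # first-occurrences is simply the first tag starting with either:
--     # return its prefix letter on first hit, None if no tag matches.
--     for x in xpos_seq:
--         if x.startswith("N"):
--             return "N"
--         if x.startswith("V"):
--             return "V"
--     return None
-- ===== Notes on version B (the rewrite author's own statement) =====
-- stated objective: simpler
-- what changed: B drops A's two-index bookkeeping and final comparison: since no tag starts with both letters, B returns the prefix letter of the first tag starting with 'N' or 'V' in one stateless scan.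
import Mathlib
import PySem

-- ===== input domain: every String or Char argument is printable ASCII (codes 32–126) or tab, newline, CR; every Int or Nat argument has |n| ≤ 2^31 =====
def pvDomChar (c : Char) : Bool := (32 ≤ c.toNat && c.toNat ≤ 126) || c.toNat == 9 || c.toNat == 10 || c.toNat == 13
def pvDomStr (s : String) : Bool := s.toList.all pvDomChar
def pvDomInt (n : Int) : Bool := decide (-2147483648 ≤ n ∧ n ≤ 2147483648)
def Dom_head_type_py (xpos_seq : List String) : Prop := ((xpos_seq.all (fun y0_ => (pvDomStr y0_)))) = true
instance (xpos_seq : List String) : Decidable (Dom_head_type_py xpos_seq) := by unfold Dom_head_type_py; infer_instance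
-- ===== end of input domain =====

-- B replaces A's two first-index trackers and final comparison by a single stateless
-- scan returning the prefix letter of the first tag starting with 'N' or 'V' (simpler).

-- ===== PORT A =====
-- the for-loop of A: state (first_n, first_v), with the 'break' when both are set
def headTypeLoop : List (Int × String) → Option Int → Option Int → Option Int × Option Int
  | [], fn, fv => (fn, fv)
  | (i, x) :: rest, fn, fv =>
    let fn' := if fn = none ∧ PySem.Str.startswith x "N" then some i else fn
    let fv' := if fv = none ∧ PySem.Str.startswith x "V" then some i else fv
    if fn' ≠ none ∧ fv' ≠ none then (fn', fv')
    else headTypeLoop rest fn' fv'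

def head_type_py (xpos_seq : List String) : Option String :=
  let st := headTypeLoop (PySem.List.enumerate xpos_seq) none none
  match st.1, st.2 with
  | none, none => none
  | none, some _ => some "V"
  | some _, none => some "N"
  | some n, some v => if n < v then some "N" else some "V"

-- ===== PORT B =====
def head_type_py_alt : List String → Option String
  | [] => none
  | x :: rest =>
    if PySem.Str.startswith x "N" then some "N"
    else if PySem.Str.startswith x "V" then some "V"
    else head_type_py_alt rest

-- ===== PRECONDITION & SPEC =====
def Spec_head_type_py (xpos_seq : List String) (out : Option String) : Prop := out = head_type_py_alt xpos_seq
instance (xpos_seq : List String) (out : Option String) : Decidable (Spec_head_type_py xpos_seq out) := by unfold Spec_head_type_py; infer_instance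

-- ===== CLAIM (what is proved, stated in full; the proofs are below) =====
def Claim_equal_head_type_py : Prop := ∀ (xpos_seq : List String), Dom_head_type_py xpos_seq → Spec_head_type_py xpos_seq (head_type_py xpos_seq)

-- ===== LEMMAS AND PROOFS =====

-- a string cannot start with both "N" and "V"
theorem not_both_NV (x : String) :
    ¬ (PySem.Str.startswith x "N" = true ∧ PySem.Str.startswith x "V" = true) := by
  rintro ⟨hN, hV⟩
  rw [PySem.Str.startswith_eq] at hN hV
  rw [PySem.Chars.startswith_iff] at hN hV
  show False
  rcases hN with ⟨tN, hN⟩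
  rcases hV with ⟨tV, hV⟩
  have : ("N".toList ++ tN) = ("V".toList ++ tV) := by rw [hN, hV]
  simp at this

-- once first_n = some i and first_v = none, with every later index larger than i,
-- the finalisation yields "N"
theorem loop_fixedN (l : List (Int × String)) (i : Int)
    (h : ∀ p ∈ l, i < p.1) :
    (match (headTypeLoop l (some i) none).1, (headTypeLoop l (some i) none).2 with
      | none, none => (none : Option String)
      | none, some _ => some "V"
      | some _, none => some "N"
      | some n, some v => if n < v then some "N" else some "V") = some "N" := by
  induction l with
  | nil => simp [headTypeLoop]
  | cons p rest ih =>
    obtain ⟨j, x⟩ := p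
    by_cases hV : PySem.Str.startswith x "V" = true
    · have hij : i < j := h (j, x) (by simp)
      rw [PySem.Str.startswith_eq] at hV
      simp [headTypeLoop, show PySem.Chars.startswith x.toList ['V'] = true from hV, hij]
    · simp only [headTypeLoop, hV]
      simpa using ih (fun q hq => h q (List.mem_cons_of_mem _ hq))

-- symmetric: first_v = some i, first_n = none
theorem loop_fixedV (l : List (Int × String)) (i : Int)
    (h : ∀ p ∈ l, i < p.1) :
    (match (headTypeLoop l none (some i)).1, (headTypeLoop l none (some i)).2 with
      | none, none => (none : Option String)
      | none, some _ => some "V"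
      | some _, none => some "N"
      | some n, some v => if n < v then some "N" else some "V") = some "V" := by
  induction l with
  | nil => simp [headTypeLoop]
  | cons p rest ih =>
    obtain ⟨j, x⟩ := p
    by_cases hN : PySem.Str.startswith x "N" = true
    · have hij : i < j := h (j, x) (by simp)
      rw [PySem.Str.startswith_eq] at hN
      simp [headTypeLoop, show PySem.Chars.startswith x.toList ['N'] = true from hN,
            if_neg (by omega : ¬ j < i)]
    · simp only [headTypeLoop, hN]
      simpa using ih (fun q hq => h q (List.mem_cons_of_mem _ hq))

theorem main_lemma (l : List String) (s : Int) :
    (match (headTypeLoop (PySem.List.enumerate l s) none none).1,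
           (headTypeLoop (PySem.List.enumerate l s) none none).2 with
      | none, none => (none : Option String)
      | none, some _ => some "V"
      | some _, none => some "N"
      | some n, some v => if n < v then some "N" else some "V") = head_type_py_alt l := by
  induction l generalizing s with
  | nil => simp [PySem.List.enumerate_nil, headTypeLoop, head_type_py_alt]
  | cons x rest ih =>
    rw [PySem.List.enumerate_cons]
    have hlater : ∀ p ∈ PySem.List.enumerate rest (s + 1), s < p.1 := by
      intro p hp
      rw [PySem.List.mem_enumerate_iff] at hp
      obtain ⟨k, hk, rfl⟩ := hp
      omega
    by_cases hN : PySem.Str.startswith x "N" = true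
    · have hV : ¬ PySem.Str.startswith x "V" = true := fun hV => not_both_NV x ⟨hN, hV⟩
      simp only [headTypeLoop, hN, hV, head_type_py_alt]
      simpa using loop_fixedN _ s hlater
    · by_cases hV : PySem.Str.startswith x "V" = true
      · simp only [headTypeLoop, hN, hV, head_type_py_alt]
        simpa using loop_fixedV _ s hlater
      · simp only [headTypeLoop, hN, hV, head_type_py_alt]
        simpa using ih (s + 1)

-- ===== VERDICT (by name: the statement is the Claim_ definition above) =====
theorem head_type_py_spec : Claim_equal_head_type_py := by
  intro xs _
  show head_type_py xs = head_type_py_alt xs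
  unfold head_type_py
  exact main_lemma xs 0
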